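-- pv_equiv track=rewrite | github.com/scv0317/sentence_tokenizer | sentence_tokenizer_ML/sentence_tokenizer.py | make_trigram
-- ===== SOURCE A (Python) =====
-- import copy
--
-- def make_trigram(source_list):
-- 	source_trigram = []
-- 	trigram = []
-- 	tmp_gram = []
-- 	for i in range(len(source_list)):
-- 		sentence_split = source_list[i].split()
-- 		for j in range(len(sentence_split)):
-- 			tmp_gram.append(sentence_split[j])
-- 			if len(tmp_gram) == 3:
-- 				tmp = copy.deepcopy(tmp_gram)
-- 				trigram.append(tmp)
-- 				del tmp_gram[0]
-- 	for i in range(len(trigram)):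
-- 		source_trigram.append(str(trigram[i][0])+" "+str(trigram[i][1])+" "+str(trigram[i][2]))
-- 	return source_trigram
-- ===== SOURCE B (Python) =====
-- def make_trigram(source_list):
--     words = [w for s in source_list for w in s.split()]
--     return [words[i] + " " + words[i + 1] + " " + words[i + 2]
--             for i in range(len(words) - 2)]
-- ===== Notes on version B (the rewrite author's own statement) =====
-- stated objective: simpler
-- what changed: Replaces A's rolling 3-word buffer with append/deepcopy/del and a second join pass by flattening all words once and building each trigram by direct index arithmetic in a single comprehension.
import Mathlib
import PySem

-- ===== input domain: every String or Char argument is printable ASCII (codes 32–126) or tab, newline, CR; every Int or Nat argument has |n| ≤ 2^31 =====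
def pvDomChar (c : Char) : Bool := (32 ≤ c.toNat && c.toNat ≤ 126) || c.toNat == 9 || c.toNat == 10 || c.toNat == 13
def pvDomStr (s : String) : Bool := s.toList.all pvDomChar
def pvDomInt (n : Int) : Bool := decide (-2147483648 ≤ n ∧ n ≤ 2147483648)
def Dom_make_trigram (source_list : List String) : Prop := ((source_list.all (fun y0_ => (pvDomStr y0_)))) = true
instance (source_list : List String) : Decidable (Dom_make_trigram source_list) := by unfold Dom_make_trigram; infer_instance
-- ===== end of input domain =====

-- B flattens all words once and builds each trigram by index arithmetic, replacing A's
-- rolling 3-word buffer (append/deepcopy/del) and its second join pass; objective: simpler.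

-- ===== PORT A =====
-- one word of the inner loop: tmp_gram.append(w); if len == 3 then emit copy and del tmp_gram[0]
def trigramStep (st : List (List String) × List String) (w : String) :
    List (List String) × List String :=
  let tmp_gram := st.2 ++ [w]
  if tmp_gram.length == 3 then (st.1 ++ [tmp_gram], tmp_gram.drop 1) else (st.1, tmp_gram)

def make_trigram (source_list : List String) : List String :=
  -- the two nested for-loops building `trigram` and `tmp_gram`
  let st := source_list.foldl (fun st s => (PySem.Str.split₀ s).foldl trigramStep st) ([], [])
  -- the final loop joining each stored triple with spaces
  st.1.map (fun t => t.getD 0 "" ++ " " ++ t.getD 1 "" ++ " " ++ t.getD 2 "")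

-- ===== PORT B =====
def make_trigram_alt (source_list : List String) : List String :=
  let words := source_list.flatMap PySem.Str.split₀
  (List.range (words.length - 2)).map (fun i =>
    words.getD i "" ++ " " ++ words.getD (i + 1) "" ++ " " ++ words.getD (i + 2) "")

-- ===== PRECONDITION & SPEC =====
def Spec_make_trigram (source_list : List String) (out : List String) : Prop := out = make_trigram_alt source_list
instance (source_list : List String) (out : List String) : Decidable (Spec_make_trigram source_list out) := by unfold Spec_make_trigram; infer_instance

-- ===== CLAIM (what is proved, stated in full; the proofs are below) =====
def Claim_equal_make_trigram : Prop := ∀ (source_list : List String), Dom_make_trigram source_list → Spec_make_trigram source_list (make_trigram source_list)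

-- ===== LEMMAS AND PROOFS =====

-- all length-3 windows of a word list
def wins : List String → List (List String)
  | a :: b :: c :: rest => [a, b, c] :: wins (b :: c :: rest)
  | _ => []

-- last (at most) two elements
def tail2 (xs : List String) : List String := xs.drop (xs.length - 2)

theorem tail2_cons (x : String) (l : List String) (h : 2 ≤ l.length) :
    tail2 (x :: l) = tail2 l := by
  unfold tail2
  have : (x :: l).length - 2 = (l.length - 2) + 1 := by simp; omega
  rw [this, List.drop_succ_cons]

-- folding the inner loop over a word list from a buffer of length ≤ 2
theorem foldl_trigramStep (ws : List String) :
    ∀ (tri : List (List String)) (b : List String), b.length ≤ 2 →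
      ws.foldl trigramStep (tri, b) = (tri ++ wins (b ++ ws), tail2 (b ++ ws)) := by
  induction ws with
  | nil =>
    intro tri b hb
    match b, hb with
    | [], _ => simp [wins, tail2]
    | [x], _ => simp [wins, tail2]
    | [x, y], _ => simp [wins, tail2]
  | cons w ws ih =>
    intro tri b hb
    match b, hb with
    | [], _ =>
      simp only [List.foldl_cons, trigramStep]
      simpa using ih tri [w] (by simp)
    | [x], _ =>
      simp only [List.foldl_cons, trigramStep]
      simpa using ih tri [x, w] (by simp)
    | [x, y], _ =>
      have hstep : trigramStep (tri, [x, y]) w = (tri ++ [[x, y, w]], [y, w]) := by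
        simp [trigramStep]
      rw [List.foldl_cons, hstep, ih (tri ++ [[x, y, w]]) [y, w] (by simp)]
      simp only [List.cons_append, List.nil_append]
      rw [show wins (x :: y :: w :: ws) = [x, y, w] :: wins (y :: w :: ws) from rfl,
        tail2_cons x (y :: w :: ws) (by simp)]
      simp

-- the outer loop over sentences equals the single fold over the flattened word list
theorem foldl_sentences (source_list : List String) :
    source_list.foldl (fun st s => (PySem.Str.split₀ s).foldl trigramStep st) (([], []) : List (List String) × List String)
      = (source_list.flatMap PySem.Str.split₀).foldl trigramStep ([], []) := by
  exact (List.foldl_flatMap).symm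

-- joining the windows equals B's indexed comprehension
theorem map_wins (xs : List String) :
    (wins xs).map (fun t => t.getD 0 "" ++ " " ++ t.getD 1 "" ++ " " ++ t.getD 2 "")
      = (List.range (xs.length - 2)).map (fun i =>
          xs.getD i "" ++ " " ++ xs.getD (i + 1) "" ++ " " ++ xs.getD (i + 2) "") := by
  match xs with
  | [] => simp [wins]
  | [a] => simp [wins]
  | [a, b] => simp [wins]
  | a :: b :: c :: rest =>
    have ih := map_wins (b :: c :: rest)
    rw [show wins (a :: b :: c :: rest) = [a, b, c] :: wins (b :: c :: rest) from rfl]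
    rw [List.map_cons, ih]
    have hlen : (a :: b :: c :: rest).length - 2 = ((b :: c :: rest).length - 2) + 1 := by
      simp
    rw [hlen, List.range_succ_eq_map, List.map_cons, List.map_map]
    simp [List.getD]

-- ===== VERDICT (by name: the statement is the Claim_ definition above) =====
theorem make_trigram_spec : Claim_equal_make_trigram := by
  intro source_list _
  show make_trigram source_list = make_trigram_alt source_list
  unfold make_trigram make_trigram_alt
  rw [foldl_sentences, foldl_trigramStep _ _ [] (by simp)]
  simpa using map_wins (source_list.flatMap PySem.Str.split₀)
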